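-- pv_equiv track=rewrite | github.com/sariswis/Proyectos-IP-2022-1 | graficas.py | mitades_i_y_d
-- ===== SOURCE A (Python) =====
-- def mitades_i_y_d(tam:int, c1:list, c2:list)->list:
--     final = []
--     i = 0
--     while i < tam:
--         fila = []
--         j = 0
--         while j < tam:
--             if j < tam/2:
--                 fila.append(c1)
--             else:
--                 fila.append(c2)
--             j += 1
--         final.append(fila)
--         i += 1
--     return final
-- ===== SOURCE B (Python) =====
-- def mitades_i_y_d(tam: int, c1: list, c2: list) -> list:
--     k = (tam + 1) // 2
--     return [[c1] * k + [c2] * (tam - k) for _ in range(tam)]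
-- ===== Notes on version B (the rewrite author's own statement) =====
-- stated objective: simpler
-- what changed: Replaces the nested per-cell comparison loops with a closed-form split index k=(tam+1)//2 and list replication to build each row.
import Mathlib
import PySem

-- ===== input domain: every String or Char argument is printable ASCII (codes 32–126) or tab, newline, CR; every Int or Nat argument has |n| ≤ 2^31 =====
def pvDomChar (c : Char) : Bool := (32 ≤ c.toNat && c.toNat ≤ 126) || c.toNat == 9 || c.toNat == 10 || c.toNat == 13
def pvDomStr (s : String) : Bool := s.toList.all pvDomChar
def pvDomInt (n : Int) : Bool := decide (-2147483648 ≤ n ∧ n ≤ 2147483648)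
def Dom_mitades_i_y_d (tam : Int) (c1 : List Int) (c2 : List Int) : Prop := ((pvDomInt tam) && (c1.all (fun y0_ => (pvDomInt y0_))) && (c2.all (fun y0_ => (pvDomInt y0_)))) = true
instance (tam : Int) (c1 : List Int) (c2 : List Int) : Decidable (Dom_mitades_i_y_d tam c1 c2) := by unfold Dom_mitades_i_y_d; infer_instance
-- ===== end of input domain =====

-- ===== PORT A =====
-- Port of A: the two counting while-loops become maps over [0, tam); the float
-- comparison j < tam/2 is exact on ints as 2*j < tam.
def mitades_i_y_d (tam : Int) (c1 : List Int) (c2 : List Int) : List (List (List Int)) :=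
  (List.range tam.toNat).map (fun _ =>
    (List.range tam.toNat).map (fun (j : Nat) => if 2 * (j : Int) < tam then c1 else c2))

-- ===== PORT B =====
-- Port of B: closed-form split k = (tam+1)//2, row built by replication.
def mitades_i_y_d_alt (tam : Int) (c1 : List Int) (c2 : List Int) : List (List (List Int)) :=
  let k := PySem.Int.floordiv (tam + 1) 2
  List.replicate tam.toNat
    (List.replicate k.toNat c1 ++ List.replicate (tam - k).toNat c2)

-- ===== PRECONDITION & SPEC =====
def Spec_mitades_i_y_d (tam : Int) (c1 : List Int) (c2 : List Int) (out : List (List (List Int))) : Prop := out = mitades_i_y_d_alt tam c1 c2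
instance (tam : Int) (c1 : List Int) (c2 : List Int) (out : List (List (List Int))) : Decidable (Spec_mitades_i_y_d tam c1 c2 out) := by unfold Spec_mitades_i_y_d; infer_instance

-- ===== CLAIM (what is proved, stated in full; the proofs are below) =====
def Claim_equal_mitades_i_y_d : Prop := ∀ (tam : Int) (c1 : List Int) (c2 : List Int), Dom_mitades_i_y_d tam c1 c2 → Spec_mitades_i_y_d tam c1 c2 (mitades_i_y_d tam c1 c2)

-- ===== LEMMAS AND PROOFS =====

-- ===== VERDICT (by name: the statement is the Claim_ definition above) =====
lemma range_map_ite_split {α : Type} (n m : Nat) (a b : α) :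
    (List.range n).map (fun j => if j < m then a else b) =
      List.replicate (min m n) a ++ List.replicate (n - m) b := by
  induction n with
  | zero => simp
  | succ n ih =>
    rw [List.range_succ, List.map_append, ih]
    by_cases h : n < m
    · have h1 : min m (n + 1) = n + 1 := by omega
      have h2 : min m n = n := by omega
      have h3 : n + 1 - m = 0 := by omega
      have h4 : n - m = 0 := by omega
      simp [h, h2, h3, h4, List.replicate_succ' (n := n)]
    · have h1 : min m (n + 1) = min m n := by omega
      have h2 : n + 1 - m = (n - m) + 1 := by omega
      simp [h, h1, h2, List.replicate_succ' (n := n - m), List.append_assoc]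

theorem mitades_i_y_d_spec : Claim_equal_mitades_i_y_d := by
  intro tam c1 c2 _
  unfold Spec_mitades_i_y_d mitades_i_y_d mitades_i_y_d_alt
  have hk : PySem.Int.floordiv (tam + 1) 2 = (tam + 1) / 2 :=
    PySem.Int.floordiv_eq_ediv_of_pos (by omega)
  have hcond : ∀ j : Nat, (2 * (j : Int) < tam) ↔ (j < ((tam + 1) / 2).toNat) := by
    intro j; omega
  have hrow : (List.range tam.toNat).map (fun (j : Nat) => if 2 * (j : Int) < tam then c1 else c2) =
      List.replicate ((tam + 1) / 2).toNat c1 ++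
        List.replicate ((tam - (tam + 1) / 2)).toNat c2 := by
    have := range_map_ite_split tam.toNat ((tam + 1) / 2).toNat c1 c2
    have hmin : min ((tam + 1) / 2).toNat tam.toNat = ((tam + 1) / 2).toNat := by omega
    have hsub : tam.toNat - ((tam + 1) / 2).toNat = (tam - (tam + 1) / 2).toNat := by omega
    rw [hmin, hsub] at this
    rw [← this]
    apply List.map_congr_left
    intro j _
    simp only [hcond j]
  simp only [hk, hrow, List.map_const', List.length_range]
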